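-- pv_equiv track=rewrite | github.com/vmc-7645/yolo-pt | yolo.py | get_adj_zone_locations
-- ===== SOURCE A (Python) =====
-- def get_adj_zone_locations(pos, array_dim=(3,2), addself=True):
--     """
--     Gets the adjacent locations of a given location in a 2d array as a 1d array
--
--     Parameters
--     ----------
--     pos: Position of tile in 1d array
--     array_dim: Dimensions of 1d array in 2ds
--     addself: whether or not to include self position as adjacent to self position
--
--     Return
--     ----------
--     Positions of element in 1d array of location 2d array adjacent to position of pos in 1d array.
--     """
--     x_pos = (pos%array_dim[0])
--     y_pos = (pos%array_dim[1])
--     zoned_arr = []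
--     counter = 0
--     for i in range(0, array_dim[1]):
--         y = []
--         for j in range(0, array_dim[0]):
--             y.append(counter)
--             counter+=1
--         zoned_arr.append(y)
--     return_arr=[]
--     for r in [-1, 0, 1]:
--         for c in [-1, 0, 1]:
--             if r == c == 0:
--                 continue
--             if 0 <= x_pos+r < array_dim[0] and 0 <= y_pos+c < array_dim[1]:
--                 return_arr.append(zoned_arr[y_pos+c][x_pos+r])
--     if addself:
--         return_arr.append(pos)
--     return return_arr
-- ===== SOURCE B (Python) =====
-- def get_adj_zone_locations(pos, array_dim=(3,2), addself=True):
--     """Adjacent 1d indices computed directly as y*w + x (no grid materialized)."""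
--     w, h = array_dim[0], array_dim[1]
--     x, y = pos % w, pos % h
--     out = []
--     for r, c in ((-1,-1), (-1,0), (-1,1), (0,-1), (0,1), (1,-1), (1,0), (1,1)):
--         if 0 <= x + r < w and 0 <= y + c < h:
--             out.append((y + c) * w + (x + r))
--     if addself:
--         out.append(pos)
--     return out
-- ===== Notes on version B (the rewrite author's own statement) =====
-- stated objective: faster
-- what changed: B computes each neighbour's 1D index directly as (y+c)*w+(x+r) over a flat list of 8 offsets instead of materializing the whole w*h grid and indexing into it.
import Mathlib
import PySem

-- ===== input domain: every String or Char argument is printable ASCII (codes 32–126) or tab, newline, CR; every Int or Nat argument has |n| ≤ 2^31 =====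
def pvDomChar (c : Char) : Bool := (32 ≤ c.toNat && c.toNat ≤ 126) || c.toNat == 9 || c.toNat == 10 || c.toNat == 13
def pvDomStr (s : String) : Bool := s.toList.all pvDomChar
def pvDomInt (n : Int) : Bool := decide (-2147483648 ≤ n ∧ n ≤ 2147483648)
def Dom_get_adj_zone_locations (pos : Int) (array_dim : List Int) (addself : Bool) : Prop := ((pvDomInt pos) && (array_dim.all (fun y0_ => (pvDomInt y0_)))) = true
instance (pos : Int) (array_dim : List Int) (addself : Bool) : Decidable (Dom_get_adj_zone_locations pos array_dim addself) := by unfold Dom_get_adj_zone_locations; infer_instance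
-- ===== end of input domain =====

-- B computes each neighbour's index directly as (y+c)*w+(x+r) instead of materializing the w*h grid (objective: faster, asymptotic).

-- ===== PORT A =====
-- inner loop: for j in range(0, array_dim[0]): y.append(counter); counter += 1
def pvRowA (w : Int) (st : List Int × Int) : List Int × Int :=
  (PySem.List.pyRange 0 w 1).foldl (fun rc _ => (rc.1 ++ [rc.2], rc.2 + 1)) st

-- outer loop building zoned_arr with the running counter
def pvZonedA (w h : Int) : List (List Int) × Int :=
  (PySem.List.pyRange 0 h 1).foldl
    (fun st _ =>
      let rc := pvRowA w ([], st.2)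
      (st.1 ++ [rc.1], rc.2)) ([], 0)

def get_adj_zone_locations (pos : Int) (array_dim : List Int) (addself : Bool) : List Int :=
  let w := (PySem.List.pyGet? array_dim 0).getD 0      -- IndexError excluded by Pre_
  let h := (PySem.List.pyGet? array_dim 1).getD 0
  let x_pos := PySem.Int.mod pos w                      -- ZeroDivisionError excluded by Pre_
  let y_pos := PySem.Int.mod pos h
  let zoned := (pvZonedA w h).1
  let ret := [(-1 : Int), 0, 1].foldl (fun acc r =>
      [(-1 : Int), 0, 1].foldl (fun acc c =>
        if r = 0 ∧ c = 0 then acc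
        else if 0 ≤ x_pos + r ∧ x_pos + r < w ∧ 0 ≤ y_pos + c ∧ y_pos + c < h then
          -- the guard puts both indices in range, so the getD defaults are never used
          acc ++ [(PySem.List.pyGet? ((PySem.List.pyGet? zoned (y_pos + c)).getD []) (x_pos + r)).getD 0]
        else acc) acc) []
  if addself then ret ++ [pos] else ret

-- ===== PORT B =====
def get_adj_zone_locations_alt (pos : Int) (array_dim : List Int) (addself : Bool) : List Int :=
  let w := (PySem.List.pyGet? array_dim 0).getD 0
  let h := (PySem.List.pyGet? array_dim 1).getD 0
  let x := PySem.Int.mod pos w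
  let y := PySem.Int.mod pos h
  let out := [((-1 : Int), (-1 : Int)), (-1, 0), (-1, 1), (0, -1), (0, 1), (1, -1), (1, 0), (1, 1)].foldl
      (fun acc rc =>
        if 0 ≤ x + rc.1 ∧ x + rc.1 < w ∧ 0 ≤ y + rc.2 ∧ y + rc.2 < h then
          acc ++ [(y + rc.2) * w + (x + rc.1)]
        else acc) []
  if addself then out ++ [pos] else out

-- ===== PRECONDITION & SPEC =====
-- Pre_ excludes exactly the inputs where Python A raises: fewer than 2 dimensions (IndexError)
-- or a zero first/second dimension (ZeroDivisionError in pos % dim).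
def Pre_get_adj_zone_locations (pos : Int) (array_dim : List Int) (addself : Bool) : Prop :=
  2 ≤ array_dim.length ∧ array_dim.getD 0 0 ≠ 0 ∧ array_dim.getD 1 0 ≠ 0
instance (pos : Int) (array_dim : List Int) (addself : Bool) : Decidable (Pre_get_adj_zone_locations pos array_dim addself) := by unfold Pre_get_adj_zone_locations; infer_instance

def pvWitness_get_adj_zone_locations : Int × List Int × Bool := (4, [3, 2], true)

def Spec_get_adj_zone_locations (pos : Int) (array_dim : List Int) (addself : Bool) (out : List Int) : Prop := out = get_adj_zone_locations_alt pos array_dim addself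
instance (pos : Int) (array_dim : List Int) (addself : Bool) (out : List Int) : Decidable (Spec_get_adj_zone_locations pos array_dim addself out) := by unfold Spec_get_adj_zone_locations; infer_instance

-- ===== CLAIM (what is proved, stated in full; the proofs are below) =====
def Claim_equal_get_adj_zone_locations : Prop := ∀ (pos : Int) (array_dim : List Int) (addself : Bool), Dom_get_adj_zone_locations pos array_dim addself → Pre_get_adj_zone_locations pos array_dim addself → Spec_get_adj_zone_locations pos array_dim addself (get_adj_zone_locations pos array_dim addself)

-- ===== LEMMAS AND PROOFS =====

-- the counter fold over any list appends consecutive integers starting at s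
theorem pvRow_fold (l : List Int) (acc : List Int) (s : Int) :
    l.foldl (fun rc _ => (rc.1 ++ [rc.2], rc.2 + 1)) (acc, s)
      = (acc ++ (List.range l.length).map (fun j : Nat => s + (j : Int)), s + l.length) := by
  induction l generalizing acc s with
  | nil => simp
  | cons a t ih =>
    rw [List.foldl_cons, ih, List.length_cons, List.range_succ_eq_map]
    simp only [Prod.mk.injEq, List.map_cons, List.map_map, List.append_assoc,
               List.singleton_append, Nat.cast_zero, add_zero]
    refine ⟨?_, by push_cast; ring⟩
    congr 1
    congr 1
    apply List.map_congr_left; intro k _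
    simp only [Function.comp_apply]; push_cast; ring

theorem pvRowA_eq (w : Int) (s : Int) :
    pvRowA w ([], s) = ((List.range (PySem.List.pyRange 0 w 1).length).map (fun j : Nat => s + (j : Int)),
                        s + (PySem.List.pyRange 0 w 1).length) := by
  unfold pvRowA; exact pvRow_fold _ [] s

-- the outer fold produces rows of consecutive blocks
theorem pvZoned_fold (w : Int) (l : List Int) (acc : List (List Int)) (s : Int) :
    (l.foldl (fun st _ => let rc := pvRowA w ([], st.2); (st.1 ++ [rc.1], rc.2)) (acc, s))
      = (acc ++ (List.range l.length).map
            (fun i : Nat => (List.range (PySem.List.pyRange 0 w 1).length).map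
              (fun j : Nat => s + ((i * (PySem.List.pyRange 0 w 1).length : Nat) : Int) + (j : Int))),
         s + l.length * (PySem.List.pyRange 0 w 1).length) := by
  induction l generalizing acc s with
  | nil => simp
  | cons a t ih =>
    rw [List.foldl_cons]
    show (t.foldl (fun st _ => let rc := pvRowA w ([], st.2); (st.1 ++ [rc.1], rc.2))
        (acc ++ [(pvRowA w ([], s)).1], (pvRowA w ([], s)).2)) = _
    rw [ih, pvRowA_eq, List.length_cons, List.range_succ_eq_map]
    simp only [Prod.mk.injEq, List.map_cons, List.map_map, List.append_assoc,
               List.singleton_append, Nat.cast_zero, add_zero, Nat.zero_mul, Nat.cast_ofNat]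
    refine ⟨?_, by push_cast; ring⟩
    congr 1
    congr 1
    apply List.map_congr_left; intro i _
    simp only [Function.comp_apply]
    apply List.map_congr_left; intro k _; push_cast; ring

theorem pvZonedA_lookup (w h i j : Int) (hi0 : 0 ≤ i) (hih : i < h) (hj0 : 0 ≤ j) (hjw : j < w) :
    (PySem.List.pyGet? ((PySem.List.pyGet? (pvZonedA w h).1 i).getD []) j).getD 0 = i * w + j := by
  have hw0 : 0 < w := lt_of_le_of_lt hj0 hjw
  have hh0 : 0 < h := lt_of_le_of_lt hi0 hih
  have hwlen : (PySem.List.pyRange 0 w 1).length = w.toNat := by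
    rw [PySem.List.length_pyRange_one]; norm_num
  have hhlen : (PySem.List.pyRange 0 h 1).length = h.toNat := by
    rw [PySem.List.length_pyRange_one]; norm_num
  have hitn : i.toNat < h.toNat := by omega
  have hjtn : j.toNat < w.toNat := by omega
  unfold pvZonedA
  rw [pvZoned_fold, List.nil_append]
  rw [show i = ((i.toNat : Nat) : Int) by omega, show j = ((j.toNat : Nat) : Int) by omega]
  simp only [PySem.List.pyGet?_natCast, List.getElem?_map, List.getElem?_range, hwlen, hhlen,
             hitn, hjtn, if_pos, Option.map_some, Option.getD_some]
  have hcast : ((i.toNat * w.toNat : Nat) : Int) = i * w := by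
    push_cast; rw [Int.toNat_of_nonneg hi0, Int.toNat_of_nonneg hw0.le]
  rw [hcast, Int.toNat_of_nonneg hi0, Int.toNat_of_nonneg hj0]
  ring

-- congruence helpers used to walk the two eight-step guard chains in lock-step
theorem pv_append_if_congr (P : Prop) [Decidable P] (acc acc' : List Int) (u v : Int)
    (hacc : acc = acc') (huv : P → u = v) :
    (if P then acc ++ [u] else acc) = (if P then acc' ++ [v] else acc') := by
  split_ifs with hp
  · rw [hacc, huv hp]
  · exact hacc

theorem pv_if_append_congr (b : Bool) (p : Int) (l l' : List Int) (h : l = l') :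
    (if b then l ++ [p] else l) = (if b then l' ++ [p] else l') := by rw [h]

-- ===== VERDICT (by name: the statement is the Claim_ definition above) =====
theorem get_adj_zone_locations_spec : Claim_equal_get_adj_zone_locations := by
  intro pos array_dim addself _ hpre
  obtain ⟨hlen, h0, h1⟩ := hpre
  unfold Spec_get_adj_zone_locations get_adj_zone_locations get_adj_zone_locations_alt
  have hg0 : PySem.List.pyGet? array_dim 0 = some (array_dim.getD 0 0) := by
    rw [show (0 : Int) = ((0 : Nat) : Int) by rfl, PySem.List.pyGet?_natCast]
    cases array_dim with
    | nil => simp at hlen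
    | cons a t => simp [List.getD]
  have hg1 : PySem.List.pyGet? array_dim 1 = some (array_dim.getD 1 0) := by
    rw [show (1 : Int) = ((1 : Nat) : Int) by rfl, PySem.List.pyGet?_natCast]
    cases array_dim with
    | nil => simp at hlen
    | cons a t =>
      cases t with
      | nil => simp at hlen
      | cons b u => simp [List.getD]
  rw [hg0, hg1]
  simp only [Option.getD_some]
  set w := array_dim.getD 0 0 with hw
  set h := array_dim.getD 1 0 with hh
  set x := PySem.Int.mod pos w with hx
  set y := PySem.Int.mod pos h with hy
  have key : ∀ r c : Int, (0 ≤ x + r ∧ x + r < w ∧ 0 ≤ y + c ∧ y + c < h) →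
      (PySem.List.pyGet? ((PySem.List.pyGet? (pvZonedA w h).1 (y + c)).getD []) (x + r)).getD 0
        = (y + c) * w + (x + r) := by
    rintro r c ⟨ha, hb, hc, hd⟩
    exact pvZonedA_lookup w h (y + c) (x + r) hc hd ha hb
  simp only [List.foldl_cons, List.foldl_nil,
             show ((-1 : Int) = 0) = False from by norm_num,
             show ((1 : Int) = 0) = False from by norm_num,
             show ((0 : Int) = 0) = True from by norm_num,
             false_and, and_false, and_true, if_true, if_false]
  refine pv_if_append_congr _ _ _ _ ?_
  exact pv_append_if_congr _ _ _ _ _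
    (pv_append_if_congr _ _ _ _ _
      (pv_append_if_congr _ _ _ _ _
        (pv_append_if_congr _ _ _ _ _
          (pv_append_if_congr _ _ _ _ _
            (pv_append_if_congr _ _ _ _ _
              (pv_append_if_congr _ _ _ _ _
                (pv_append_if_congr _ _ _ _ _ rfl (key (-1) (-1)))
                (key (-1) 0))
              (key (-1) 1))
            (key 0 (-1)))
          (key 0 1))
        (key 1 (-1)))
      (key 1 0))
    (key 1 1)
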